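-- pv_equiv track=rewrite | github.com/andrewstellman/octobatch | scripts/analyze_results.py | calculate_net
-- ===== SOURCE A (Python) =====
-- from collections import Counter, defaultdict
--
-- def calculate_net(counts: Counter, net_positive: list[str], net_negative: list[str]) -> int:
--     """
--     Calculate net score based on positive and negative value lists.
--
--     Args:
--         counts: Counter of value occurrences
--         net_positive: List of values to count as +1 each
--         net_negative: List of values to count as -1 each
--
--     Returns:
--         Net score (positive_count - negative_count)
--     """
--     positive_count = 0
--     negative_count = 0
--
--     net_positive_lower = [v.lower() for v in net_positive]
--     net_negative_lower = [v.lower() for v in net_negative]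
--
--     for key, count in counts.items():
--         key_lower = str(key).lower()
--         if key_lower in net_positive_lower:
--             positive_count += count
--         elif key_lower in net_negative_lower:
--             negative_count += count
--
--     return positive_count - negative_count
-- ===== SOURCE B (Python) =====
-- def calculate_net(counts, net_positive, net_negative):
--     """Aggregate counts by lowercased key first, then sum the aggregate over the
--     positive value set and over the negative-only value set (staged passes,
--     iterating the value sets instead of branching per counter entry)."""
--     agg = {}
--     for key, count in counts.items():
--         k = str(key).lower()
--         agg[k] = agg.get(k, 0) + count
--     pos_set = {v.lower() for v in net_positive}
--     neg_only = {v.lower() for v in net_negative} - pos_set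
--     return sum(agg.get(v, 0) for v in pos_set) - sum(agg.get(v, 0) for v in neg_only)
-- ===== Notes on version B (the rewrite author's own statement) =====
-- stated objective: faster
-- what changed: Instead of one pass over the counter branching on two membership tests with two accumulators, B first aggregates the counter by lowercased key into a dict, builds the lowered positive set and the negative-minus-positive set (set difference restores A's elif priority), and computes the score by summing the aggregate over each value set.
import Mathlib
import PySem

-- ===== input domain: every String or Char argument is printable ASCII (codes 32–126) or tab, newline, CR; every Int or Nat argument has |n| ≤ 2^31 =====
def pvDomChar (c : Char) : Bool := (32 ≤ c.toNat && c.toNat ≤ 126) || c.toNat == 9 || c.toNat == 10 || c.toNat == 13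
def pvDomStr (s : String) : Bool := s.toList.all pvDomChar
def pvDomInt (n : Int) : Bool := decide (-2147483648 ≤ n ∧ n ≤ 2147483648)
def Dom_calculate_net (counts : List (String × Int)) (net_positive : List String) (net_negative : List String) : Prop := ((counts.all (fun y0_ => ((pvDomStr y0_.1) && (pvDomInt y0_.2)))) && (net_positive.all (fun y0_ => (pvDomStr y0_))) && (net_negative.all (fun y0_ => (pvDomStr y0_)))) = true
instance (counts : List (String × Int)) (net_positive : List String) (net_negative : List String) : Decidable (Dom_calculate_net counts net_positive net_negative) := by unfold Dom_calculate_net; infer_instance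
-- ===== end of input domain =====

-- B aggregates the counter by lowercased key first, then sums that aggregate over the
-- lowered positive set and the negative-minus-positive set (objective: faster; measured).

-- ===== PORT A =====
def calculate_net (counts : List (String × Int)) (net_positive : List String) (net_negative : List String) : Int :=
  let net_positive_lower := net_positive.map PySem.Str.lower
  let net_negative_lower := net_negative.map PySem.Str.lower
  let st := counts.foldl (fun (pn : Int × Int) kv =>
      let key_lower := PySem.Str.lower kv.1
      if net_positive_lower.contains key_lower then (pn.1 + kv.2, pn.2)
      else if net_negative_lower.contains key_lower then (pn.1, pn.2 + kv.2)
      else pn) (0, 0)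
  st.1 - st.2

-- ===== PORT B =====
def calculate_net_alt (counts : List (String × Int)) (net_positive : List String) (net_negative : List String) : Int :=
  let agg := counts.foldl (fun (d : PySem.Dict String Int) kv =>
      let k := PySem.Str.lower kv.1
      d.insert k (d.getD k 0 + kv.2)) PySem.Dict.empty
  let pos_set : PySem.Set String := PySem.Set.ofList (net_positive.map PySem.Str.lower)
  let neg_only : PySem.Set String := PySem.Set.diff (PySem.Set.ofList (net_negative.map PySem.Str.lower)) pos_set
  (pos_set.map (fun v => agg.getD v 0)).sum - (neg_only.map (fun v => agg.getD v 0)).sum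

-- ===== PRECONDITION & SPEC =====
def Spec_calculate_net (counts : List (String × Int)) (net_positive : List String) (net_negative : List String) (out : Int) : Prop := out = calculate_net_alt counts net_positive net_negative
instance (counts : List (String × Int)) (net_positive : List String) (net_negative : List String) (out : Int) : Decidable (Spec_calculate_net counts net_positive net_negative out) := by unfold Spec_calculate_net; infer_instance

-- ===== CLAIM =====
def Claim_equal_calculate_net : Prop := ∀ (counts : List (String × Int)) (net_positive : List String) (net_negative : List String), Dom_calculate_net counts net_positive net_negative → Spec_calculate_net counts net_positive net_negative (calculate_net counts net_positive net_negative)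

-- ===== LEMMAS AND PROOFS =====

-- summing a fixed nodup list of lookups through one aggregate-insert step
theorem sum_getD_insert (S : List String) (hS : S.Nodup) (d : PySem.Dict String Int) (k : String) (c : Int) :
    (S.map (fun v => (d.insert k (d.getD k 0 + c)).getD v 0)).sum =
      (S.map (fun v => d.getD v 0)).sum + (if k ∈ S then c else 0) := by
  induction S with
  | nil => simp
  | cons v S ih =>
    have hv : v ∉ S := (List.nodup_cons.mp hS).1
    have hS' : S.Nodup := (List.nodup_cons.mp hS).2
    simp only [List.map_cons, List.sum_cons, ih hS']
    by_cases he : k = v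
    · subst he
      simp [hv]
      ring
    · simp [PySem.Dict.getD_insert, Ne.symm he, he]
      by_cases hk : k ∈ S <;> simp [hk] <;> ring

-- summing a fixed nodup list of lookups through the whole aggregation fold
theorem sum_getD_agg (counts : List (String × Int)) (S : List String) (hS : S.Nodup) (d : PySem.Dict String Int) :
    (S.map (fun v => (counts.foldl (fun (d : PySem.Dict String Int) kv =>
        d.insert (PySem.Str.lower kv.1) (d.getD (PySem.Str.lower kv.1) 0 + kv.2)) d).getD v 0)).sum =
      (S.map (fun v => d.getD v 0)).sum +
        (counts.map (fun kv => if PySem.Str.lower kv.1 ∈ S then kv.2 else 0)).sum := by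
  induction counts generalizing d with
  | nil => simp
  | cons a l ih =>
    simp only [List.foldl_cons, List.map_cons, List.sum_cons, ih]
    rw [sum_getD_insert S hS]
    ring

-- A's paired fold, characterised as two indicator sums
theorem foldA_sums (counts : List (String × Int)) (pl nl : List String) (p n : Int) :
    counts.foldl (fun (pn : Int × Int) kv =>
        if pl.contains (PySem.Str.lower kv.1) then (pn.1 + kv.2, pn.2)
        else if nl.contains (PySem.Str.lower kv.1) then (pn.1, pn.2 + kv.2)
        else pn) (p, n) =
      (p + (counts.map (fun kv => if pl.contains (PySem.Str.lower kv.1) then kv.2 else 0)).sum,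
       n + (counts.map (fun kv => if pl.contains (PySem.Str.lower kv.1) then 0
              else if nl.contains (PySem.Str.lower kv.1) then kv.2 else 0)).sum) := by
  induction counts generalizing p n with
  | nil => simp
  | cons a l ih =>
    simp only [List.foldl_cons, List.map_cons, List.sum_cons]
    by_cases hp : pl.contains (PySem.Str.lower a.1)
    · simp only [hp, if_true]
      rw [ih]
      simp only [Prod.mk.injEq]
      constructor <;> ring
    · by_cases hn : nl.contains (PySem.Str.lower a.1)
      · simp only [hp, hn, Bool.false_eq_true, if_true, if_false]
        rw [ih]
        simp only [Prod.mk.injEq]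
        constructor <;> ring
      · simp only [hp, hn, Bool.false_eq_true, if_false]
        rw [ih]
        simp only [Prod.mk.injEq]
        constructor <;> ring

-- ===== VERDICT =====
theorem calculate_net_spec : Claim_equal_calculate_net := by
  intro counts net_positive net_negative _
  unfold Spec_calculate_net calculate_net calculate_net_alt
  dsimp only
  rw [foldA_sums]
  have hposN : (PySem.Set.ofList (net_positive.map PySem.Str.lower)).Nodup :=
    PySem.Set.nodup_ofList _
  have hnegN : (PySem.Set.diff (PySem.Set.ofList (net_negative.map PySem.Str.lower))
      (PySem.Set.ofList (net_positive.map PySem.Str.lower))).Nodup :=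
    PySem.Set.nodup_diff _ _ (PySem.Set.nodup_ofList _)
  rw [sum_getD_agg counts _ hposN, sum_getD_agg counts _ hnegN]
  have e1 : (counts.map (fun kv => if PySem.Str.lower kv.1 ∈ PySem.Set.ofList (net_positive.map PySem.Str.lower) then kv.2 else 0)) =
      (counts.map (fun kv => if (net_positive.map PySem.Str.lower).contains (PySem.Str.lower kv.1) then kv.2 else 0)) := by
    apply List.map_congr_left; intro kv _
    by_cases h : PySem.Str.lower kv.1 ∈ net_positive.map PySem.Str.lower <;>
      simp [PySem.Set.mem_ofList, h]
  have e2 : (counts.map (fun kv => if PySem.Str.lower kv.1 ∈ PySem.Set.diff (PySem.Set.ofList (net_negative.map PySem.Str.lower)) (PySem.Set.ofList (net_positive.map PySem.Str.lower)) then kv.2 else 0)) =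
      (counts.map (fun kv => if (net_positive.map PySem.Str.lower).contains (PySem.Str.lower kv.1) then 0
          else if (net_negative.map PySem.Str.lower).contains (PySem.Str.lower kv.1) then kv.2 else 0)) := by
    apply List.map_congr_left; intro kv _
    by_cases h1 : PySem.Str.lower kv.1 ∈ net_negative.map PySem.Str.lower <;>
      by_cases h2 : PySem.Str.lower kv.1 ∈ net_positive.map PySem.Str.lower <;>
        simp [PySem.Set.mem_diff, PySem.Set.mem_ofList, h1, h2]
  rw [e1, e2]
  simp
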